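-- pv_equiv track=rewrite | github.com/JAQQAL/integer_programming_dorfromantik | solver.py | adjacentNodes
-- ===== SOURCE A (Python) =====
-- def getNeighbours(board, size, row, column):
--     neighbours = []
--
--     if row < size-1:
--         poss = [(row-1,column-1),(row-1,column),(row,column-1),(row,column+1),(row+1,column),(row+1,column+1)]
--     elif row == size-1:
--         poss = [(row-1,column-1),(row-1,column),(row,column-1),(row,column+1),(row+1,column-1),(row+1,column)]
--     else:
--         poss = [(row-1,column),(row-1,column+1),(row,column-1),(row,column+1),(row+1,column-1),(row+1,column)]
--
--     for f in poss:
--         if f in board: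
--             neighbours.append(f)
--
--     return neighbours
--
-- def opposingSegment(board, size, row, column, k):
--     n = getNeighbours(board,size,row,column)
--
--
--     #same row
--     if k == 1:
--         if (row,column+1) in n:
--             return row,column+1,4
--     elif k == 4:
--         if (row,column-1) in n:
--             return row,column-1,1
--
--     #cetermine based on different sections of the board: upper half, middle row, lower half
--     #upper half
--     if row < size-1:
--         if k == 0:
--             if (row-1,column) in n:
--                 return row-1,column,3
--         elif k == 2:
--             if (row+1,column+1) in n:
--                 return row+1,column+1,5
--         elif k == 3:
--             if (row+1,column) in n:
--                 return row+1,column,0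
--         elif k == 5:
--             if (row-1,column-1) in n:
--                 return row-1,column-1,2
--     #middle row
--     elif row == size-1:
--         if k == 0:
--             if (row-1,column) in n:
--                 return row-1,column,3
--         elif k == 2:
--             if (row+1,column) in n:
--                 return row+1,column,5
--         elif k == 3:
--             if (row+1,column-1) in n:
--                 return row+1,column-1,0
--         elif k == 5:
--             if (row-1,column-1) in n:
--                 return row-1,column-1,2
--     #lower half
--     elif row > size-1:
--         if k == 0:
--             if (row-1,column+1) in n:
--                 return row-1,column+1,3
--         elif k == 2:
--             if (row+1,column) in n:
--                 return row+1,column,5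
--         elif k == 3:
--             if (row+1,column-1) in n:
--                 return row+1,column-1,0
--         elif k == 5:
--             if (row-1,column) in n:
--                 return row-1,column,2
--
--     return row, column, k
--
-- def adjacentNodes(board,size,i, j, k):
--     n = []
--     #node is central segment of a field
--     if k == 6:
--         for l in range(0,6):
--             n.append((i,j,l))
--     else:
--         #central segment
--         n.append((i,j,6))
--         #neighbouring boundary segments
--         n.append((i,j,(k+1)%6))
--         n.append((i,j,(k-1)%6))
--         #node is a segment that faces another field
--         if opposingSegment(board,size,i,j,k) != (i,j,k):
--             n.append(opposingSegment(board,size,i,j,k))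
--
--     return n
-- ===== SOURCE B (Python) =====
-- # Table-driven rewrite: one offset table keyed by (region, k) replaces
-- # getNeighbours and the opposingSegment branch cascade.
-- _OFF = {
--     ('u', 0): (-1, 0, 3), ('u', 2): (1, 1, 5), ('u', 3): (1, 0, 0), ('u', 5): (-1, -1, 2),
--     ('m', 0): (-1, 0, 3), ('m', 2): (1, 0, 5), ('m', 3): (1, -1, 0), ('m', 5): (-1, -1, 2),
--     ('l', 0): (-1, 1, 3), ('l', 2): (1, 0, 5), ('l', 3): (1, -1, 0), ('l', 5): (-1, 0, 2),
-- }
--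
-- def adjacentNodes(board, size, i, j, k):
--     if k == 6:
--         return [(i, j, l) for l in range(6)]
--     n = [(i, j, 6), (i, j, (k + 1) % 6), (i, j, (k - 1) % 6)]
--     if k == 1:
--         off = (0, 1, 4)
--     elif k == 4:
--         off = (0, -1, 1)
--     else:
--         region = 'u' if i < size - 1 else ('m' if i == size - 1 else 'l')
--         off = _OFF.get((region, k))
--     if off is not None:
--         dr, dc, nk = off
--         if (i + dr, j + dc) in board:
--             n.append((i + dr, j + dc, nk))
--     return n
-- ===== Notes on version B (the rewrite author's own statement) =====
-- stated objective: simpler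
-- what changed: Replaced the getNeighbours filter pass and opposingSegment's three-region branch cascade by a single static offset table keyed by (region, k) plus one direct board membership test.
import Mathlib
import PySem

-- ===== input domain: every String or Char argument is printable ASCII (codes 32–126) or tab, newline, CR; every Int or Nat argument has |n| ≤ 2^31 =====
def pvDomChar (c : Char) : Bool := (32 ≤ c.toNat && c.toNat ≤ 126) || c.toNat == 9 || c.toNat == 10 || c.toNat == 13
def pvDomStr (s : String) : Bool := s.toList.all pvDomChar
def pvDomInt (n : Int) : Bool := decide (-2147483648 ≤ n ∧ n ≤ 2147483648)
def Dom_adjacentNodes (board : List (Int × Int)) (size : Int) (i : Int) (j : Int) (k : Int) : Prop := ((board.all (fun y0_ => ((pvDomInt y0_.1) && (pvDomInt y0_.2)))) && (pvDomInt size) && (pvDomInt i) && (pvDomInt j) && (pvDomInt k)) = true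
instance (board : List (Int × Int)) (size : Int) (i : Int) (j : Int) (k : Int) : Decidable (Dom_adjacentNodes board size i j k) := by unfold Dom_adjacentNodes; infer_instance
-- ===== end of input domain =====

-- B replaces A's getNeighbours pass and opposingSegment branch cascade by one
-- static offset table keyed by (region, k) and a direct board membership test
-- (objective: simpler).

-- ===== PORT A =====
def getNeighbours (board : List (Int × Int)) (size row column : Int) : List (Int × Int) :=
  let poss : List (Int × Int) :=
    if row < size - 1 then
      [(row-1,column-1),(row-1,column),(row,column-1),(row,column+1),(row+1,column),(row+1,column+1)]
    else if row = size - 1 then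
      [(row-1,column-1),(row-1,column),(row,column-1),(row,column+1),(row+1,column-1),(row+1,column)]
    else
      [(row-1,column),(row-1,column+1),(row,column-1),(row,column+1),(row+1,column-1),(row+1,column)]
  poss.foldl (fun acc f => if f ∈ board then acc ++ [f] else acc) []

def opposingSegment (board : List (Int × Int)) (size row column k : Int) : Int × Int × Int :=
  let n := getNeighbours board size row column
  -- same row
  if k = 1 ∧ (row, column+1) ∈ n then (row, column+1, 4)
  else if k = 4 ∧ (row, column-1) ∈ n then (row, column-1, 1)
  -- upper half
  else if row < size - 1 then
    if k = 0 ∧ (row-1, column) ∈ n then (row-1, column, 3)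
    else if k = 2 ∧ (row+1, column+1) ∈ n then (row+1, column+1, 5)
    else if k = 3 ∧ (row+1, column) ∈ n then (row+1, column, 0)
    else if k = 5 ∧ (row-1, column-1) ∈ n then (row-1, column-1, 2)
    else (row, column, k)
  -- middle row
  else if row = size - 1 then
    if k = 0 ∧ (row-1, column) ∈ n then (row-1, column, 3)
    else if k = 2 ∧ (row+1, column) ∈ n then (row+1, column, 5)
    else if k = 3 ∧ (row+1, column-1) ∈ n then (row+1, column-1, 0)
    else if k = 5 ∧ (row-1, column-1) ∈ n then (row-1, column-1, 2)
    else (row, column, k)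
  -- lower half
  else if row > size - 1 then
    if k = 0 ∧ (row-1, column+1) ∈ n then (row-1, column+1, 3)
    else if k = 2 ∧ (row+1, column) ∈ n then (row+1, column, 5)
    else if k = 3 ∧ (row+1, column-1) ∈ n then (row+1, column-1, 0)
    else if k = 5 ∧ (row-1, column) ∈ n then (row-1, column, 2)
    else (row, column, k)
  else (row, column, k)

def adjacentNodes (board : List (Int × Int)) (size : Int) (i : Int) (j : Int) (k : Int) : List (Int × Int × Int) :=
  if k = 6 then
    (PySem.List.pyRange 0 6 1).foldl (fun n l => n ++ [(i, j, l)]) []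
  else
    let n : List (Int × Int × Int) :=
      [(i, j, 6), (i, j, PySem.Int.mod (k+1) 6), (i, j, PySem.Int.mod (k-1) 6)]
    if opposingSegment board size i j k ≠ (i, j, k) then
      n ++ [opposingSegment board size i j k]
    else n

-- ===== PORT B =====
def offTable : List ((String × Int) × (Int × Int × Int)) :=
  [(("u", 0), (-1, 0, 3)), (("u", 2), (1, 1, 5)), (("u", 3), (1, 0, 0)), (("u", 5), (-1, -1, 2)),
   (("m", 0), (-1, 0, 3)), (("m", 2), (1, 0, 5)), (("m", 3), (1, -1, 0)), (("m", 5), (-1, -1, 2)),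
   (("l", 0), (-1, 1, 3)), (("l", 2), (1, 0, 5)), (("l", 3), (1, -1, 0)), (("l", 5), (-1, 0, 2))]

def adjacentNodes_alt (board : List (Int × Int)) (size : Int) (i : Int) (j : Int) (k : Int) : List (Int × Int × Int) :=
  if k = 6 then
    (PySem.List.pyRange 0 6 1).map (fun l => (i, j, l))
  else
    let n : List (Int × Int × Int) :=
      [(i, j, 6), (i, j, PySem.Int.mod (k+1) 6), (i, j, PySem.Int.mod (k-1) 6)]
    let off : Option (Int × Int × Int) :=
      if k = 1 then some (0, 1, 4)
      else if k = 4 then some (0, -1, 1)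
      else
        let region := if i < size - 1 then "u" else if i = size - 1 then "m" else "l"
        offTable.lookup (region, k)
    match off with
    | some (dr, dc, nk) => if (i + dr, j + dc) ∈ board then n ++ [(i + dr, j + dc, nk)] else n
    | none => n

-- ===== PRECONDITION & SPEC =====
def Spec_adjacentNodes (board : List (Int × Int)) (size : Int) (i : Int) (j : Int) (k : Int) (out : List (Int × Int × Int)) : Prop := out = adjacentNodes_alt board size i j k
instance (board : List (Int × Int)) (size : Int) (i : Int) (j : Int) (k : Int) (out : List (Int × Int × Int)) : Decidable (Spec_adjacentNodes board size i j k out) := by unfold Spec_adjacentNodes; infer_instance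

-- ===== CLAIM (what is proved, stated in full; the proofs are below) =====
def Claim_equal_adjacentNodes : Prop := ∀ (board : List (Int × Int)) (size : Int) (i : Int) (j : Int) (k : Int), Dom_adjacentNodes board size i j k → Spec_adjacentNodes board size i j k (adjacentNodes board size i j k)

-- ===== LEMMAS AND PROOFS =====
-- A's neighbour loop is the filter of its candidate list by board membership.
theorem foldl_filter_mem (board : List (Int × Int)) :
    ∀ (poss acc : List (Int × Int)),
      poss.foldl (fun acc f => if f ∈ board then acc ++ [f] else acc) acc
        = acc ++ poss.filter (fun f => decide (f ∈ board)) := by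
  intro poss
  induction poss with
  | nil => intro acc; simp
  | cons h t ih =>
      intro acc
      by_cases hb : h ∈ board <;> simp [List.foldl, List.filter, hb, ih]

theorem mem_getNeighbours (board : List (Int × Int)) (size row column : Int) (c : Int × Int) :
    c ∈ getNeighbours board size row column ↔
      c ∈ (if row < size - 1 then
      [(row-1,column-1),(row-1,column),(row,column-1),(row,column+1),(row+1,column),(row+1,column+1)]
    else if row = size - 1 then
      [(row-1,column-1),(row-1,column),(row,column-1),(row,column+1),(row+1,column-1),(row+1,column)]
    else
      [(row-1,column),(row-1,column+1),(row,column-1),(row,column+1),(row+1,column-1),(row+1,column)]) ∧ c ∈ board := by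
  unfold getNeighbours
  rw [foldl_filter_mem]
  simp [List.mem_filter]

theorem lookup_offTable_none (r : String) (k : Int)
    (h0 : ¬ k = 0) (h2 : ¬ k = 2) (h3 : ¬ k = 3) (h5 : ¬ k = 5) :
    List.lookup (r, k) offTable = none := by
  have e : ∀ (s : String) (m : Int), ¬ k = m → ((r, k) == (s, m)) = false := by
    intro s m hm; simp [hm]
  simp [offTable, List.lookup, e _ _ h0, e _ _ h2, e _ _ h3, e _ _ h5]

-- ===== VERDICT (by name: the statement is the Claim_ definition above) =====
theorem adjacentNodes_spec : Claim_equal_adjacentNodes := by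
  intro board size i j k _
  unfold Spec_adjacentNodes adjacentNodes adjacentNodes_alt opposingSegment
  by_cases hk6 : k = 6
  · simp [hk6, PySem.List.pyRange, List.range_succ]
  · simp only [if_neg hk6, mem_getNeighbours]
    rcases lt_trichotomy i (size - 1) with hr | hr | hr
    · -- upper half
      simp only [if_pos hr]
      by_cases h1 : k = 1
      · subst h1
        by_cases hb : (i, j + 1) ∈ board <;> simp [sub_eq_add_neg, hb]
      · by_cases h4 : k = 4
        · subst h4
          by_cases hb : (i, j + -1) ∈ board <;> simp [sub_eq_add_neg, h1, hb]
        · by_cases h0 : k = 0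
          · subst h0
            by_cases hb : (i + -1, j) ∈ board <;>
              simp [sub_eq_add_neg, h1, h4, hb, (by decide : List.lookup (("u":String), (0:Int)) offTable = some (-1, 0, 3))]
          · by_cases h2 : k = 2
            · subst h2
              by_cases hb : (i + 1, j + 1) ∈ board <;>
                simp [sub_eq_add_neg, h1, h0, hb, (by decide : List.lookup (("u":String), (2:Int)) offTable = some (1, 1, 5))]
            · by_cases h3 : k = 3
              · subst h3
                by_cases hb : (i + 1, j) ∈ board <;>
                  simp [sub_eq_add_neg, h1, h0, hb, (by decide : List.lookup (("u":String), (3:Int)) offTable = some (1, 0, 0))]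
              · by_cases h5 : k = 5
                · subst h5
                  by_cases hb : (i + -1, j + -1) ∈ board <;>
                    simp [sub_eq_add_neg, h1, h0, hb, (by decide : List.lookup (("u":String), (5:Int)) offTable = some (-1, -1, 2))]
                · simp [sub_eq_add_neg, h1, h4, h0, h2, h3, h5, lookup_offTable_none _ _ h0 h2 h3 h5]
    · -- middle row
      simp only [if_neg (by omega : ¬ i < size - 1), if_pos hr]
      by_cases h1 : k = 1
      · subst h1
        by_cases hb : (i, j + 1) ∈ board <;> simp [sub_eq_add_neg, hb]
      · by_cases h4 : k = 4
        · subst h4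
          by_cases hb : (i, j + -1) ∈ board <;> simp [sub_eq_add_neg, h1, hb]
        · by_cases h0 : k = 0
          · subst h0
            by_cases hb : (i + -1, j) ∈ board <;>
              simp [sub_eq_add_neg, h1, h4, hb, (by decide : List.lookup (("m":String), (0:Int)) offTable = some (-1, 0, 3))]
          · by_cases h2 : k = 2
            · subst h2
              by_cases hb : (i + 1, j) ∈ board <;>
                simp [sub_eq_add_neg, h1, h0, hb, (by decide : List.lookup (("m":String), (2:Int)) offTable = some (1, 0, 5))]
            · by_cases h3 : k = 3
              · subst h3
                by_cases hb : (i + 1, j + -1) ∈ board <;>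
                  simp [sub_eq_add_neg, h1, h0, hb, (by decide : List.lookup (("m":String), (3:Int)) offTable = some (1, -1, 0))]
              · by_cases h5 : k = 5
                · subst h5
                  by_cases hb : (i + -1, j + -1) ∈ board <;>
                    simp [sub_eq_add_neg, h1, h0, hb, (by decide : List.lookup (("m":String), (5:Int)) offTable = some (-1, -1, 2))]
                · simp [sub_eq_add_neg, h1, h4, h0, h2, h3, h5, lookup_offTable_none _ _ h0 h2 h3 h5]
    · -- lower half
      simp only [if_neg (by omega : ¬ i < size - 1), if_neg (by omega : ¬ i = size - 1),
        if_pos hr]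
      by_cases h1 : k = 1
      · subst h1
        by_cases hb : (i, j + 1) ∈ board <;> simp [sub_eq_add_neg, hb]
      · by_cases h4 : k = 4
        · subst h4
          by_cases hb : (i, j + -1) ∈ board <;> simp [sub_eq_add_neg, h1, hb]
        · by_cases h0 : k = 0
          · subst h0
            by_cases hb : (i + -1, j + 1) ∈ board <;>
              simp [sub_eq_add_neg, h1, h4, hb, (by decide : List.lookup (("l":String), (0:Int)) offTable = some (-1, 1, 3))]
          · by_cases h2 : k = 2
            · subst h2
              by_cases hb : (i + 1, j) ∈ board <;>
                simp [sub_eq_add_neg, h1, h0, hb, (by decide : List.lookup (("l":String), (2:Int)) offTable = some (1, 0, 5))]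
            · by_cases h3 : k = 3
              · subst h3
                by_cases hb : (i + 1, j + -1) ∈ board <;>
                  simp [sub_eq_add_neg, h1, h0, hb, (by decide : List.lookup (("l":String), (3:Int)) offTable = some (1, -1, 0))]
              · by_cases h5 : k = 5
                · subst h5
                  by_cases hb : (i + -1, j) ∈ board <;>
                    simp [sub_eq_add_neg, h1, h0, hb, (by decide : List.lookup (("l":String), (5:Int)) offTable = some (-1, 0, 2))]
                · simp [sub_eq_add_neg, h1, h4, h0, h2, h3, h5, lookup_offTable_none _ _ h0 h2 h3 h5]
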